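-- pv_equiv track=rewrite | github.com/pbelevich/deepep_efa | deep_ep/buffer.py | _find_contiguous_blocks
-- ===== SOURCE A (Python) =====
-- def _find_contiguous_blocks(num_ranks, num_local_ranks, my_node,
--                             elem_counts_list, offsets_list, is_inter):
--     """Find contiguous blocks of inter-node (or intra-node) data in a flat buffer.
--
--     Returns list of (offset, num_elems) tuples for contiguous blocks.
--     For 2-node case, inter-node data is typically a single contiguous block.
--     """
--     blocks = []
--     block_start_off = None
--     block_elems = 0
--     for r in range(num_ranks):
--         is_inter_rank = (r // num_local_ranks != my_node)
--         if is_inter_rank == is_inter: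
--             n_elem = int(elem_counts_list[r])
--             off = int(offsets_list[r])
--             if block_start_off is None:
--                 block_start_off = off
--                 block_elems = n_elem
--             elif off == block_start_off + block_elems:
--                 block_elems += n_elem
--             else:
--                 if block_elems > 0:
--                     blocks.append((block_start_off, block_elems))
--                 block_start_off = off
--                 block_elems = n_elem
--         else:
--             if block_start_off is not None and block_elems > 0:
--                 blocks.append((block_start_off, block_elems))
--             block_start_off = None
--             block_elems = 0
--     if block_start_off is not None and block_elems > 0:
--         blocks.append((block_start_off, block_elems))
--     return blocks
-- ===== SOURCE B (Python) =====
-- def _merge_run(pairs):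
--     # pairs is a nonempty list of (offset, n_elem) for a run of consecutive matching ranks
--     blocks = []
--     cur_off, cur_elems = pairs[0]
--     for off, n in pairs[1:]:
--         if off == cur_off + cur_elems:
--             cur_elems += n
--         else:
--             if cur_elems > 0:
--                 blocks.append((cur_off, cur_elems))
--             cur_off, cur_elems = off, n
--     if cur_elems > 0:
--         blocks.append((cur_off, cur_elems))
--     return blocks
--
--
-- def _find_contiguous_blocks(num_ranks, num_local_ranks, my_node,
--                             elem_counts_list, offsets_list, is_inter):
--     # Phase 1: split ranks into maximal runs of consecutive matching ranks.
--     runs = []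
--     cur = []
--     for r in range(num_ranks):
--         if (r // num_local_ranks != my_node) == is_inter:
--             cur.append((int(offsets_list[r]), int(elem_counts_list[r])))
--         elif cur:
--             runs.append(cur)
--             cur = []
--     if cur:
--         runs.append(cur)
--     # Phase 2: merge adjacent pairs inside each run, concatenate.
--     out = []
--     for run in runs:
--         out.extend(_merge_run(run))
--     return out
-- ===== Notes on version B (the rewrite author's own statement) =====
-- stated objective: alternative
-- what changed: Replaced A's single fused loop with tri-state carry (Optional start offset, running count, flush-on-boundary) by a two-phase decomposition: one pass partitions ranks into maximal runs of consecutive matching ranks, then a separate small merge routine coalesces adjacent (offset,count) pairs inside each run; the results are concatenated.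
import Mathlib
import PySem

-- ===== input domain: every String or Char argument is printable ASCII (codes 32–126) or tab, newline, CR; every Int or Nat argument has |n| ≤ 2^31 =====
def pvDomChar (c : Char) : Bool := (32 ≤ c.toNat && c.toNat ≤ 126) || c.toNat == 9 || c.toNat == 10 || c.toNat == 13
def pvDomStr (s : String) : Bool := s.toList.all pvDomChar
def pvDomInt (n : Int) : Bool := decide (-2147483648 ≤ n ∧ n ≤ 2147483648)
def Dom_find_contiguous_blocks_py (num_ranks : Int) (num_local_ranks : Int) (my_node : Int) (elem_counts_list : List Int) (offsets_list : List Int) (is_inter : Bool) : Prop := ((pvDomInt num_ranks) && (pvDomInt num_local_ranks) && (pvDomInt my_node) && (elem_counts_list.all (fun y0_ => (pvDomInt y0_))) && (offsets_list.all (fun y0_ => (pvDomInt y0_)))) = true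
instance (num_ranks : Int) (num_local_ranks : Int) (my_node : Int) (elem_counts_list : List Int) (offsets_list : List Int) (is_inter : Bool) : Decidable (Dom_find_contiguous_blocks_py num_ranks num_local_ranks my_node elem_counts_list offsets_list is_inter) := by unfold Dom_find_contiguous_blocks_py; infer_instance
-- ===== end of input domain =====

-- B replaces A's fused loop (Optional start, running count) by a two-phase group-then-merge
-- decomposition (alternative structure, same cost); equal return value proved on Pre_.


-- ===== PORT A =====
-- A's loop step: state = (blocks, block_start_off, block_elems).
-- elem_counts_list[r] / offsets_list[r] are ported with pyGet?; the '.getD 0' is reached only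
-- outside Pre_ (where Python raises IndexError).
def pvAStep (num_local_ranks my_node : Int) (elem_counts_list offsets_list : List Int)
    (is_inter : Bool) (st : List (Int × Int) × Option Int × Int) (r : Int) :
    List (Int × Int) × Option Int × Int :=
  let blocks := st.1
  let block_start_off := st.2.1
  let block_elems := st.2.2
  let is_inter_rank : Bool := decide (PySem.Int.floordiv r num_local_ranks ≠ my_node)
  if is_inter_rank == is_inter then
    let n_elem := (PySem.List.pyGet? elem_counts_list r).getD 0
    let off := (PySem.List.pyGet? offsets_list r).getD 0
    match block_start_off with
    | none => (blocks, some off, n_elem)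
    | some s =>
      if off = s + block_elems then
        (blocks, some s, block_elems + n_elem)
      else
        ((if block_elems > 0 then blocks ++ [(s, block_elems)] else blocks), some off, n_elem)
  else
    match block_start_off with
    | some s =>
      ((if block_elems > 0 then blocks ++ [(s, block_elems)] else blocks), none, 0)
    | none => (blocks, none, 0)

def find_contiguous_blocks_py (num_ranks : Int) (num_local_ranks : Int) (my_node : Int) (elem_counts_list : List Int) (offsets_list : List Int) (is_inter : Bool) : List (Int × Int) :=
  let fin := (PySem.List.pyRange 0 num_ranks 1).foldl
    (pvAStep num_local_ranks my_node elem_counts_list offsets_list is_inter) ([], none, 0)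
  match fin.2.1 with
  | some s => if fin.2.2 > 0 then fin.1 ++ [(s, fin.2.2)] else fin.1
  | none => fin.1

-- ===== PORT B =====
-- merge loop step of _merge_run: state = (blocks, cur_off, cur_elems)
def pvMergeStep (st : List (Int × Int) × Int × Int) (p : Int × Int) :
    List (Int × Int) × Int × Int :=
  if p.1 = st.2.1 + st.2.2 then (st.1, st.2.1, st.2.2 + p.2)
  else ((if st.2.2 > 0 then st.1 ++ [(st.2.1, st.2.2)] else st.1), p.1, p.2)

-- _merge_run (called only on nonempty runs; [] case for totality)
def pvMergeRun : List (Int × Int) → List (Int × Int)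
  | [] => []
  | p :: rest =>
    let fin := rest.foldl pvMergeStep ([], p.1, p.2)
    fin.1 ++ (if fin.2.2 > 0 then [(fin.2.1, fin.2.2)] else [])

-- phase-1 step: state = (runs, cur)
def pvRunStep (num_local_ranks my_node : Int) (elem_counts_list offsets_list : List Int)
    (is_inter : Bool) (st : List (List (Int × Int)) × List (Int × Int)) (r : Int) :
    List (List (Int × Int)) × List (Int × Int) :=
  if (decide (PySem.Int.floordiv r num_local_ranks ≠ my_node) : Bool) == is_inter then
    (st.1, st.2 ++ [((PySem.List.pyGet? offsets_list r).getD 0,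
                     (PySem.List.pyGet? elem_counts_list r).getD 0)])
  else if st.2.isEmpty then st
  else (st.1 ++ [st.2], [])

def find_contiguous_blocks_py_alt (num_ranks : Int) (num_local_ranks : Int) (my_node : Int) (elem_counts_list : List Int) (offsets_list : List Int) (is_inter : Bool) : List (Int × Int) :=
  let fin := (PySem.List.pyRange 0 num_ranks 1).foldl
    (pvRunStep num_local_ranks my_node elem_counts_list offsets_list is_inter) ([], [])
  let runs := if fin.2.isEmpty then fin.1 else fin.1 ++ [fin.2]
  runs.foldl (fun acc run => acc ++ pvMergeRun run) []

-- ===== PRECONDITION & SPEC =====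
-- Pre_ excludes exactly the inputs where Python A raises: num_local_ranks = 0 (ZeroDivisionError
-- in r // num_local_ranks) and any matching rank r indexing past either list (IndexError).
def Pre_find_contiguous_blocks_py (num_ranks : Int) (num_local_ranks : Int) (my_node : Int) (elem_counts_list : List Int) (offsets_list : List Int) (is_inter : Bool) : Prop :=
  num_ranks ≤ 0 ∨
  (num_local_ranks ≠ 0 ∧
    (let L : Int := min (elem_counts_list.length : Int) (offsets_list.length : Int)
     -- ranks r with r // num_local_ranks = my_node form the half-open interval [a, b)
     let a : Int := if 0 < num_local_ranks then my_node * num_local_ranks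
                    else (my_node + 1) * num_local_ranks + 1
     let b : Int := if 0 < num_local_ranks then (my_node + 1) * num_local_ranks
                    else my_node * num_local_ranks + 1
     if is_inter then num_ranks ≤ L ∨ (a ≤ L ∧ num_ranks ≤ b)
     else num_ranks ≤ L ∨ b ≤ L ∨ num_ranks ≤ a))
instance (num_ranks : Int) (num_local_ranks : Int) (my_node : Int) (elem_counts_list : List Int) (offsets_list : List Int) (is_inter : Bool) : Decidable (Pre_find_contiguous_blocks_py num_ranks num_local_ranks my_node elem_counts_list offsets_list is_inter) := by unfold Pre_find_contiguous_blocks_py; infer_instance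
def pvWitness_find_contiguous_blocks_py : Int × Int × Int × List Int × List Int × Bool :=
  (4, 2, 0, [5, 5, 5, 5], [0, 5, 10, 15], true)

def Spec_find_contiguous_blocks_py (num_ranks : Int) (num_local_ranks : Int) (my_node : Int) (elem_counts_list : List Int) (offsets_list : List Int) (is_inter : Bool) (out : List (Int × Int)) : Prop := out = find_contiguous_blocks_py_alt num_ranks num_local_ranks my_node elem_counts_list offsets_list is_inter
instance (num_ranks : Int) (num_local_ranks : Int) (my_node : Int) (elem_counts_list : List Int) (offsets_list : List Int) (is_inter : Bool) (out : List (Int × Int)) : Decidable (Spec_find_contiguous_blocks_py num_ranks num_local_ranks my_node elem_counts_list offsets_list is_inter out) := by unfold Spec_find_contiguous_blocks_py; infer_instance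

-- ===== CLAIM (what is proved, stated in full; the proofs are below) =====
def Claim_equal_find_contiguous_blocks_py : Prop := ∀ (num_ranks : Int) (num_local_ranks : Int) (my_node : Int) (elem_counts_list : List Int) (offsets_list : List Int) (is_inter : Bool), Dom_find_contiguous_blocks_py num_ranks num_local_ranks my_node elem_counts_list offsets_list is_inter → Pre_find_contiguous_blocks_py num_ranks num_local_ranks my_node elem_counts_list offsets_list is_inter → Spec_find_contiguous_blocks_py num_ranks num_local_ranks my_node elem_counts_list offsets_list is_inter (find_contiguous_blocks_py num_ranks num_local_ranks my_node elem_counts_list offsets_list is_inter)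

-- ===== LEMMAS AND PROOFS =====

-- concatenation of merged runs
def pvMergedAll (runs : List (List (Int × Int))) : List (Int × Int) :=
  (runs.map pvMergeRun).flatten

-- A's state that corresponds to B's phase-1 state (runs, cur)
def pvAbs (runs : List (List (Int × Int))) (cur : List (Int × Int)) :
    List (Int × Int) × Option Int × Int :=
  match cur with
  | [] => (pvMergedAll runs, none, 0)
  | p :: rest =>
    let fin := rest.foldl pvMergeStep ([], p.1, p.2)
    (pvMergedAll runs ++ fin.1, some fin.2.1, fin.2.2)

-- A's finalization
def pvFinA (st : List (Int × Int) × Option Int × Int) : List (Int × Int) :=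
  match st.2.1 with
  | some s => if st.2.2 > 0 then st.1 ++ [(s, st.2.2)] else st.1
  | none => st.1

-- B's finalization
def pvFinB (st : List (List (Int × Int)) × List (Int × Int)) : List (Int × Int) :=
  (if st.2.isEmpty then st.1 else st.1 ++ [st.2]).foldl (fun acc run => acc ++ pvMergeRun run) []

lemma pv_foldl_append_merged (runs : List (List (Int × Int))) :
    ∀ acc : List (Int × Int),
      runs.foldl (fun acc run => acc ++ pvMergeRun run) acc = acc ++ pvMergedAll runs := by
  induction runs with
  | nil => intro acc; simp [pvMergedAll]
  | cons h t ih => intro acc; simp [pvMergedAll, ih, List.map_cons, List.flatten_cons]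

-- equation lemma for pvMergeRun on a nonempty run
lemma pvMergeRun_cons (p : Int × Int) (rest : List (Int × Int)) :
    pvMergeRun (p :: rest) =
      (rest.foldl pvMergeStep ([], p)).1 ++
        (if 0 < (rest.foldl pvMergeStep ([], p)).2.2 then
          [((rest.foldl pvMergeStep ([], p)).2.1, (rest.foldl pvMergeStep ([], p)).2.2)]
        else []) := rfl

-- base case: finalizing the corresponding states gives the same result
lemma pv_fin_abs (runs : List (List (Int × Int))) (cur : List (Int × Int)) :
    pvFinA (pvAbs runs cur) = pvFinB (runs, cur) := by
  cases cur with
  | nil =>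
    simp only [pvAbs, pvFinA, pvFinB, List.isEmpty_nil, if_true]
    rw [pv_foldl_append_merged]
    simp
  | cons p rest =>
    simp only [pvAbs, pvFinA, pvFinB, List.isEmpty_cons, Bool.false_eq_true, if_false]
    rw [pv_foldl_append_merged]
    simp only [List.nil_append, pvMergedAll, List.map_append, List.flatten_append,
      List.map_cons, List.map_nil, List.flatten_cons, List.flatten_nil, List.append_nil,
      pvMergeRun_cons]
    split_ifs <;> simp

-- step case: A's step tracks B's step through the abstraction
lemma pv_step_abs (num_local_ranks my_node : Int) (ec off : List Int) (is_inter : Bool)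
    (runs : List (List (Int × Int))) (cur : List (Int × Int)) (r : Int) :
    pvAStep num_local_ranks my_node ec off is_inter (pvAbs runs cur) r =
      pvAbs (pvRunStep num_local_ranks my_node ec off is_inter (runs, cur) r).1
            (pvRunStep num_local_ranks my_node ec off is_inter (runs, cur) r).2 := by
  by_cases hm : ((decide (PySem.Int.floordiv r num_local_ranks ≠ my_node) : Bool) == is_inter) = true
  · -- matching rank
    cases cur with
    | nil =>
      simp at hm
      simp [pvAStep, pvRunStep, pvAbs, hm]
    | cons p rest =>
      simp only [pvAStep, pvRunStep, pvAbs, hm, if_true]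
      have hfold : (rest ++ [((PySem.List.pyGet? off r).getD 0, (PySem.List.pyGet? ec r).getD 0)]).foldl
          pvMergeStep ([], p.1, p.2)
          = pvMergeStep (rest.foldl pvMergeStep ([], p.1, p.2))
              ((PySem.List.pyGet? off r).getD 0, (PySem.List.pyGet? ec r).getD 0) := by
        simp [List.foldl_append]
      simp only [List.cons_append, hfold]
      set fin := rest.foldl pvMergeStep ([], p.1, p.2) with hfin
      simp only [pvMergeStep]
      split_ifs with h1 h2 <;> simp_all
  · -- non-matching rank
    cases cur with
    | nil =>
      simp at hm
      simp [pvAStep, pvRunStep, pvAbs, hm]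
    | cons p rest =>
      simp at hm
      simp only [pvAStep, pvRunStep, pvAbs]
      simp [hm, pvMergedAll, pvMergeRun_cons]
      split_ifs <;> simp

lemma pv_fold_abs (num_local_ranks my_node : Int) (ec off : List Int) (is_inter : Bool)
    (L : List Int) :
    ∀ (runs : List (List (Int × Int))) (cur : List (Int × Int)),
      pvFinA (L.foldl (pvAStep num_local_ranks my_node ec off is_inter) (pvAbs runs cur)) =
      pvFinB (L.foldl (pvRunStep num_local_ranks my_node ec off is_inter) (runs, cur)) := by
  induction L with
  | nil => intro runs cur; exact pv_fin_abs runs cur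
  | cons x xs ih =>
    intro runs cur
    simp only [List.foldl_cons]
    rw [pv_step_abs]
    exact ih _ _

-- ===== VERDICT (by name: the statement is the Claim_ definition above) =====
theorem find_contiguous_blocks_py_spec : Claim_equal_find_contiguous_blocks_py := by
  intro num_ranks num_local_ranks my_node ec off is_inter _hDom _hPre
  unfold Spec_find_contiguous_blocks_py
  have h := pv_fold_abs num_local_ranks my_node ec off is_inter
    (PySem.List.pyRange 0 num_ranks 1) [] []
  simpa [find_contiguous_blocks_py, find_contiguous_blocks_py_alt, pvAbs, pvMergedAll,
    pvFinA, pvFinB] using h
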